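-- pv_equiv track=rewrite | github.com/zimbrul-co/cubrid-python | django_cubrid/base.py | date_trunc_sql
-- ===== SOURCE A (Python) =====
-- def date_trunc_sql(lookup_type, field_name):
--     fields = [
--             'year', 'month', 'day', 'hour',
--             'minute', 'second', 'milisecond'
--         ]
--     # Use double percents to escape.
--     format = (
--             '%%Y-', '%%m', '-%%d', ' %%H:', '%%i', ':%%s', '.%%ms'
--         )
--     format_def = ('0000-', '01', '-01', ' 00:', '00', ':00', '.00')
--     try:
--         i = fields.index(lookup_type) + 1
--     except ValueError:
--         sql = field_name
--     else:
--         format_str = ''.join(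
--             [f for f in format[:i]] + [f for f in format_def[i:]])
--         sql = "CAST(DATE_FORMAT(%s, '%s') AS DATETIME)" % (
--             field_name, format_str)
--     return sql
-- ===== SOURCE B (Python) =====
-- _TRUNC_FORMATS = {
--     'year':       '%%Y-01-01 00:00:00.00',
--     'month':      '%%Y-%%m-01 00:00:00.00',
--     'day':        '%%Y-%%m-%%d 00:00:00.00',
--     'hour':       '%%Y-%%m-%%d %%H:00:00.00',
--     'minute':     '%%Y-%%m-%%d %%H:%%i:00.00',
--     'second':     '%%Y-%%m-%%d %%H:%%i:%%s.00',
--     'milisecond': '%%Y-%%m-%%d %%H:%%i:%%s.%%ms',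
-- }
--
-- def date_trunc_sql(lookup_type, field_name):
--     fmt = _TRUNC_FORMATS.get(lookup_type)
--     if fmt is None:
--         return field_name
--     return "CAST(DATE_FORMAT(%s, '%s') AS DATETIME)" % (field_name, fmt)
-- ===== Notes on version B (the rewrite author's own statement) =====
-- stated objective: simpler
-- what changed: Replaces the index search over three parallel tuples plus slicing and join with a precomputed table mapping each lookup type to its finished format string, substituted directly into the CAST template.
import Mathlib
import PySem

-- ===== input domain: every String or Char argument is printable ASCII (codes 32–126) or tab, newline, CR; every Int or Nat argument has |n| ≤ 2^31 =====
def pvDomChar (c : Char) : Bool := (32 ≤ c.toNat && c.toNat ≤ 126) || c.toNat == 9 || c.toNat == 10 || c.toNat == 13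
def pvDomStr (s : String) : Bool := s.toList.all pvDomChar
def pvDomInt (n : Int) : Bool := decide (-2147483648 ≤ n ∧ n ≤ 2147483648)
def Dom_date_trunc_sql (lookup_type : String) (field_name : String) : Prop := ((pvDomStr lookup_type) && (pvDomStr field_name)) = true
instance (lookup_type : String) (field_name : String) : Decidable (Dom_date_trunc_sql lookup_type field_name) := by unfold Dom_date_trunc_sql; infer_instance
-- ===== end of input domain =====

-- B replaces A's index search over parallel tuples + slicing/join with a precomputed
-- lookup-type → finished-format-string table (objective: simpler).

-- ===== PORT A =====
def date_trunc_sql (lookup_type : String) (field_name : String) : String :=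
  let fields : List String :=
    ["year", "month", "day", "hour", "minute", "second", "milisecond"]
  let format : List String :=
    ["%%Y-", "%%m", "-%%d", " %%H:", "%%i", ":%%s", ".%%ms"]
  let format_def : List String :=
    ["0000-", "01", "-01", " 00:", "00", ":00", ".00"]
  match PySem.List.index? fields lookup_type with
  | none => field_name
  | some idx =>
      let i : Int := (idx : Int) + 1
      let format_str := PySem.Str.join ""
        (PySem.List.slice format none (some i) ++ PySem.List.slice format_def (some i) none)
      "CAST(DATE_FORMAT(" ++ field_name ++ ", '" ++ format_str ++ "') AS DATETIME)"

-- ===== PORT B =====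
def pvTruncFormats : PySem.Dict String String := PySem.Dict.mk  -- dict literal (distinct keys)
  [ ("year",       "%%Y-01-01 00:00:00.00"),
    ("month",      "%%Y-%%m-01 00:00:00.00"),
    ("day",        "%%Y-%%m-%%d 00:00:00.00"),
    ("hour",       "%%Y-%%m-%%d %%H:00:00.00"),
    ("minute",     "%%Y-%%m-%%d %%H:%%i:00.00"),
    ("second",     "%%Y-%%m-%%d %%H:%%i:%%s.00"),
    ("milisecond", "%%Y-%%m-%%d %%H:%%i:%%s.%%ms") ]

def date_trunc_sql_alt (lookup_type : String) (field_name : String) : String :=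
  match pvTruncFormats.get? lookup_type with
  | none => field_name
  | some fmt => "CAST(DATE_FORMAT(" ++ field_name ++ ", '" ++ fmt ++ "') AS DATETIME)"

-- ===== PRECONDITION & SPEC =====
def Spec_date_trunc_sql (lookup_type : String) (field_name : String) (out : String) : Prop := out = date_trunc_sql_alt lookup_type field_name
instance (lookup_type : String) (field_name : String) (out : String) : Decidable (Spec_date_trunc_sql lookup_type field_name out) := by unfold Spec_date_trunc_sql; infer_instance

-- ===== CLAIM (what is proved, stated in full; the proofs are below) =====
def Claim_equal_date_trunc_sql : Prop := ∀ (lookup_type : String) (field_name : String), Dom_date_trunc_sql lookup_type field_name → Spec_date_trunc_sql lookup_type field_name (date_trunc_sql lookup_type field_name)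

-- ===== LEMMAS AND PROOFS =====

-- ===== VERDICT (by name: the statement is the Claim_ definition above) =====
theorem date_trunc_sql_spec : Claim_equal_date_trunc_sql := by
  intro lt fn _
  unfold Spec_date_trunc_sql date_trunc_sql date_trunc_sql_alt
  by_cases h : lt ∈ (["year", "month", "day", "hour", "minute", "second", "milisecond"] : List String)
  · simp only [List.mem_cons, List.not_mem_nil, or_false] at h
    rcases h with h | h | h | h | h | h | h <;> subst h <;> rfl
  · have hA : PySem.List.index?
        (["year", "month", "day", "hour", "minute", "second", "milisecond"] : List String) lt = none :=
      (PySem.List.index?_eq_none_iff _ _).mpr h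
    simp only [List.mem_cons, List.not_mem_nil, or_false, not_or] at h
    obtain ⟨h1, h2, h3, h4, h5, h6, h7⟩ := h
    simp only [hA]
    simp [pvTruncFormats, PySem.Dict.get?,
      Ne.symm h1, Ne.symm h2, Ne.symm h3, Ne.symm h4, Ne.symm h5, Ne.symm h6, Ne.symm h7]
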